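-- pv_equiv track=rewrite | github.com/fangzhao2019/system_code-version2 | save_to_database/word_of_mouth/DiLiFenBu.py | getRepeatMapOpinion
-- ===== SOURCE A (Python) =====
-- def getRepeatMapOpinion(list, province, feature):
--     i = -1
--     index = -1
--     for record in list:
--         i = i + 1
--         if province == record['province'] and feature == record['feature']:
--             index = i
--     return index
-- ===== SOURCE B (Python) =====
-- def getRepeatMapOpinion(list, province, feature):
--     n = len(list)
--     for i, record in enumerate(reversed(list)):
--         if province == record['province'] and feature == record['feature']:
--             return n - 1 - i
--     return -1
-- ===== Notes on version B (the rewrite author's own statement) =====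
-- stated objective: idiomatic
-- what changed: Replaces the forward full scan that keeps overwriting a tracked index with a reverse traversal (enumerate over reversed(list)) that returns the first match immediately.
import Mathlib
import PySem

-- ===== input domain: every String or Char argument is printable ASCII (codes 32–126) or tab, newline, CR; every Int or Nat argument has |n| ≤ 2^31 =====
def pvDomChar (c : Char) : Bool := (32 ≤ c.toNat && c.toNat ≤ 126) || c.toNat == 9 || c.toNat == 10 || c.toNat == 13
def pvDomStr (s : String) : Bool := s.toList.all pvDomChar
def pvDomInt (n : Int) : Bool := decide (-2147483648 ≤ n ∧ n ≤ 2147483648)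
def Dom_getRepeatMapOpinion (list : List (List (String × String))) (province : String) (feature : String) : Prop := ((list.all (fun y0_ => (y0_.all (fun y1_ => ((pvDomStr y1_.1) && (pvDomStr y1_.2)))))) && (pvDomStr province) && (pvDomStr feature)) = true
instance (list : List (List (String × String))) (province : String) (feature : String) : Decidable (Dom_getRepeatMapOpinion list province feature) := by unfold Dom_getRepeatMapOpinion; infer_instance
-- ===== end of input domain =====

-- B replaces A's forward scan that overwrites a tracked index with a reverse traversal that
-- returns the first match immediately (objective: idiomatic; return value only, no mutation).

-- ===== PORT A =====
-- the record lookups and the guard of A's loop body (exact, under Pre_: both keys resolvable)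
def pvMatch (record : List (String × String)) (province : String) (feature : String) : Bool :=
  ((PySem.Dict.mk record).get? "province" == some province) &&
  ((PySem.Dict.mk record).get? "feature" == some feature)

def getRepeatMapOpinion (list : List (List (String × String))) (province : String) (feature : String) : Int :=
  (list.foldl
    (fun (st : Int × Int) record =>
      let i := st.1 + 1
      (i, if pvMatch record province feature then i else st.2))
    (-1, -1)).2

-- ===== PORT B =====
-- 'for i, record in enumerate(reversed(list)): if match: return n - 1 - i' / 'return -1'
def pvAltGo (province : String) (feature : String) (n : Int) : Int → List (List (String × String)) → Int
  | _, [] => -1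
  | i, r :: rest =>
      if pvMatch r province feature then n - 1 - i else pvAltGo province feature n (i + 1) rest

def getRepeatMapOpinion_alt (list : List (List (String × String))) (province : String) (feature : String) : Int :=
  pvAltGo province feature (list.length : Int) 0 list.reverse

-- ===== PRECONDITION & SPEC =====
-- Pre_ excludes exactly the inputs where the Python A raises KeyError: some record has no
-- 'province' key, or its 'province' value equals province but it has no 'feature' key.
def Pre_getRepeatMapOpinion (list : List (List (String × String))) (province : String) (feature : String) : Prop :=
  ∀ r ∈ list, ((PySem.Dict.mk r).get? "province").isSome ∧
    ((PySem.Dict.mk r).get? "province" = some province → ((PySem.Dict.mk r).get? "feature").isSome)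
instance (list : List (List (String × String))) (province : String) (feature : String) : Decidable (Pre_getRepeatMapOpinion list province feature) := by unfold Pre_getRepeatMapOpinion; infer_instance

def pvWitness_getRepeatMapOpinion : (List (List (String × String))) × String × String :=
  ([[("province", "x"), ("feature", "y")], [("province", "z"), ("feature", "y")]], "x", "y")

def Spec_getRepeatMapOpinion (list : List (List (String × String))) (province : String) (feature : String) (out : Int) : Prop := out = getRepeatMapOpinion_alt list province feature
instance (list : List (List (String × String))) (province : String) (feature : String) (out : Int) : Decidable (Spec_getRepeatMapOpinion list province feature out) := by unfold Spec_getRepeatMapOpinion; infer_instance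

-- ===== CLAIM (what is proved, stated in full; the proofs are below) =====
def Claim_equal_getRepeatMapOpinion : Prop := ∀ (list : List (List (String × String))) (province : String) (feature : String), Dom_getRepeatMapOpinion list province feature → Pre_getRepeatMapOpinion list province feature → Spec_getRepeatMapOpinion list province feature (getRepeatMapOpinion list province feature)

-- ===== LEMMAS AND PROOFS =====

-- the first component of A's fold state counts the elements seen
theorem pvFoldFst (province feature : String) (l : List (List (String × String))) (i0 idx0 : Int) :
    (l.foldl (fun (st : Int × Int) record =>
        let i := st.1 + 1
        (i, if pvMatch record province feature then i else st.2)) (i0, idx0)).1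
      = i0 + l.length := by
  induction l generalizing i0 idx0 with
  | nil => simp
  | cons r rest ih =>
      simp only [List.foldl_cons, List.length_cons]
      split_ifs <;> rw [ih] <;> push_cast <;> ring

-- A on a snoc: the last record decides
theorem pvA_snoc (province feature : String) (l : List (List (String × String))) (r : List (String × String)) :
    getRepeatMapOpinion (l ++ [r]) province feature
      = if pvMatch r province feature then (l.length : Int)
        else getRepeatMapOpinion l province feature := by
  unfold getRepeatMapOpinion
  rw [List.foldl_append]
  simp only [List.foldl_cons, List.foldl_nil]
  rw [pvFoldFst]
  split_ifs with h
  · ring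
  · rfl

-- B's helper only depends on n - i
theorem pvAltGo_shift (province feature : String) (n i : Int) (xs : List (List (String × String))) :
    pvAltGo province feature (n + 1) (i + 1) xs = pvAltGo province feature n i xs := by
  induction xs generalizing i with
  | nil => rfl
  | cons r rest ih =>
      simp only [pvAltGo]
      split_ifs with h
      · ring
      · exact ih (i + 1)

-- B on a snoc: the last record is inspected first
theorem pvB_snoc (province feature : String) (l : List (List (String × String))) (r : List (String × String)) :
    getRepeatMapOpinion_alt (l ++ [r]) province feature
      = if pvMatch r province feature then (l.length : Int)
        else getRepeatMapOpinion_alt l province feature := by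
  unfold getRepeatMapOpinion_alt
  rw [List.reverse_append]
  simp only [List.reverse_cons, List.reverse_nil, List.nil_append, List.cons_append,
    List.length_append, List.length_cons, List.length_nil]
  simp only [pvAltGo]
  split_ifs with h
  · push_cast; ring
  · calc pvAltGo province feature ((l.length + 1 : Nat) : Int) (0 + 1) l.reverse
        = pvAltGo province feature ((l.length : Int) + 1) (0 + 1) l.reverse := by push_cast; ring_nf
      _ = pvAltGo province feature (l.length : Int) 0 l.reverse := pvAltGo_shift _ _ _ _ _

theorem pvAB (l : List (List (String × String))) (province feature : String) :
    getRepeatMapOpinion l province feature = getRepeatMapOpinion_alt l province feature := by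
  induction l using List.reverseRecOn with
  | nil => rfl
  | append_singleton l r ih =>
      rw [pvA_snoc, pvB_snoc, ih]

-- ===== VERDICT (by name: the statement is the Claim_ definition above) =====
theorem getRepeatMapOpinion_spec : Claim_equal_getRepeatMapOpinion := by
  intro l p f _ _
  exact pvAB l p f
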